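-- pv_equiv track=rewrite | github.com/hayj/STSSeries | util/shape.py | crossValidationChunk
-- ===== SOURCE A (Python) =====
-- import math
--
-- def chunkList(l, partsCount):
--     chunkedList = []
--     partsItemNumber = int(math.ceil(float(len(l)) / float(partsCount)))
--     for i in range(partsCount):
--         left = l[:partsItemNumber]
--         right = l[partsItemNumber:]
--         chunkedList.append(left)
--         l = right
--     return chunkedList
--
-- def crossValidationChunk(l, partsCount):
--     chunkedSet = chunkList(l, partsCount)
--     trainingSets = []
--     testSets = []
--     for i in range(len(chunkedSet)):
--         testSets.append(chunkedSet[i])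
--         currentMatrixTrainingSet = []
--         for u in range(len(chunkedSet)):
--             if u != i:
--                 currentMatrixTrainingSet.append(chunkedSet[u])
--         currentListTrainingSet = []
--         for current in currentMatrixTrainingSet:
--             currentListTrainingSet += current
--         trainingSets.append(currentListTrainingSet)
--     return (trainingSets, testSets)
-- ===== SOURCE B (Python) =====
-- import math
--
-- def crossValidationChunk(l, partsCount):
--     size = int(math.ceil(len(l) / partsCount))
--     chunks = [l[i * size:(i + 1) * size] for i in range(partsCount)]
--     full = [x for c in chunks for x in c]
--     trainingSets = []
--     testSets = []
--     offset = 0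
--     for c in chunks:
--         testSets.append(c)
--         trainingSets.append(full[:offset] + full[offset + len(c):])
--         offset += len(c)
--     return (trainingSets, testSets)
-- ===== Notes on version B (the rewrite author's own statement) =====
-- stated objective: alternative
-- what changed: chunkList's peel-a-prefix loop becomes a slice comprehension over index ranges, and the per-fold 'append every chunk except i, then concatenate' double loop is replaced by one flatten of all chunks plus two slices around a running offset per fold.
import Mathlib
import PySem

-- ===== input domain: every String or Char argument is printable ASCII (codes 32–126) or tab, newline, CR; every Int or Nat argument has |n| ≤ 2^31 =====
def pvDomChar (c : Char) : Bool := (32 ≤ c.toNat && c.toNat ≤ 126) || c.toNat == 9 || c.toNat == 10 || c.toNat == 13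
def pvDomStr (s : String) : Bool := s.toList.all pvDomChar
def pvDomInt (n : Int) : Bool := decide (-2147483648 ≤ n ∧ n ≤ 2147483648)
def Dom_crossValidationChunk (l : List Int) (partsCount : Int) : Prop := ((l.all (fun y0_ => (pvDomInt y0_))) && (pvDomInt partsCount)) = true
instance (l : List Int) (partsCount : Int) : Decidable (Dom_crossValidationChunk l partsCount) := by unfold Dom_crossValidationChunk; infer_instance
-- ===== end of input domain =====

-- B replaces the per-fold "append every chunk except i, then concatenate" double loop by one
-- flatten of all chunks plus two slices around a running offset (objective: alternative decomposition).

-- ===== PORT A =====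
-- chunkList: repeatedly peels a prefix of partsItemNumber items; math.ceil(float(n)/float(p))
-- is exact integer ceiling -((-n)//p) on the stated domain (lengths and |partsCount| ≤ 2^31).
def chunkListA (l : List Int) (partsCount : Int) : List (List Int) :=
  let partsItemNumber : Int := -(PySem.Int.floordiv (-((l.length : Int))) partsCount)
  ((PySem.List.pyRange 0 partsCount).foldl
    (fun (st : List (List Int) × List Int) _ =>
      (st.1 ++ [PySem.List.slice st.2 none (some partsItemNumber)],
       PySem.List.slice st.2 (some partsItemNumber) none))
    ([], l)).1

def crossValidationChunk (l : List Int) (partsCount : Int) : List (List Int) × List (List Int) :=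
  let chunkedSet := chunkListA l partsCount
  (PySem.List.pyRange 0 (chunkedSet.length : Int)).foldl
    (fun (st : List (List Int) × List (List Int)) i =>
      let testSets := st.2 ++ [PySem.List.pyGetD chunkedSet i []]
      let currentMatrixTrainingSet :=
        (PySem.List.pyRange 0 (chunkedSet.length : Int)).foldl
          (fun acc u => if u != i then acc ++ [PySem.List.pyGetD chunkedSet u []] else acc) []
      let currentListTrainingSet :=
        currentMatrixTrainingSet.foldl (fun acc current => acc ++ current) []
      (st.1 ++ [currentListTrainingSet], testSets))
    ([], [])

-- ===== PORT B =====
def crossValidationChunk_alt (l : List Int) (partsCount : Int) : List (List Int) × List (List Int) :=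
  let size : Int := -(PySem.Int.floordiv (-((l.length : Int))) partsCount)
  let chunks := (PySem.List.pyRange 0 partsCount).map
    (fun i => PySem.List.slice l (some (i * size)) (some ((i + 1) * size)))
  let full := chunks.flatMap id
  let st := chunks.foldl
    (fun (st : List (List Int) × List (List Int) × Int) c =>
      (st.1 ++ [PySem.List.slice full none (some st.2.2) ++
                PySem.List.slice full (some (st.2.2 + (c.length : Int))) none],
       st.2.1 ++ [c],
       st.2.2 + (c.length : Int)))
    ([], [], 0)
  (st.1, st.2.1)

-- ===== PRECONDITION & SPEC =====
-- Pre_ excludes only partsCount = 0, on which the Python A raises ZeroDivisionError.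
def Pre_crossValidationChunk (_l : List Int) (partsCount : Int) : Prop := partsCount ≠ 0
instance (l : List Int) (partsCount : Int) : Decidable (Pre_crossValidationChunk l partsCount) := by unfold Pre_crossValidationChunk; infer_instance

def pvWitness_crossValidationChunk : List Int × Int := ([1, 2, 3, 4, 5], 2)

def Spec_crossValidationChunk (l : List Int) (partsCount : Int) (out : List (List Int) × List (List Int)) : Prop := out = crossValidationChunk_alt l partsCount
instance (l : List Int) (partsCount : Int) (out : List (List Int) × List (List Int)) : Decidable (Spec_crossValidationChunk l partsCount out) := by unfold Spec_crossValidationChunk; infer_instance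

-- ===== CLAIM (what is proved, stated in full; the proofs are below) =====
def Claim_equal_crossValidationChunk : Prop := ∀ (l : List Int) (partsCount : Int), Dom_crossValidationChunk l partsCount → Pre_crossValidationChunk l partsCount → Spec_crossValidationChunk l partsCount (crossValidationChunk l partsCount)

-- ===== LEMMAS AND PROOFS =====

-- closed form of the training sets: element i is (flatten of chunks before i) ++ (flatten of chunks after i)
def trainOf (pre : List (List Int)) : List (List Int) → List (List Int)
  | [] => []
  | c :: rest => (pre.flatMap id ++ rest.flatMap id) :: trainOf (pre ++ [c]) rest

lemma trainOf_eq_map : ∀ (cs pre : List (List Int)),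
    trainOf pre cs = (List.range cs.length).map
      (fun i => (pre ++ cs.take i).flatMap id ++ (cs.drop (i + 1)).flatMap id) := by
  intro cs
  induction cs with
  | nil => intro pre; simp [trainOf]
  | cons c rest ih =>
      intro pre
      simp only [trainOf, List.length_cons, List.range_succ_eq_map, List.map_cons,
        List.map_map, ih (pre ++ [c])]
      congr 1
      · simp
      · apply List.map_congr_left
        intro i _
        simp [List.append_assoc]

-- the peel loop of chunkList, in take/drop form
lemma peel_loop (m : Nat) : ∀ (idxs : List Int) (l : List Int) (acc : List (List Int)),
    (idxs.foldl (fun (st : List (List Int) × List Int) _ =>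
        (st.1 ++ [st.2.take m], st.2.drop m)) (acc, l)).1
      = acc ++ (List.range idxs.length).map (fun k => (l.drop (k * m)).take m) := by
  intro idxs
  induction idxs with
  | nil => intro l acc; simp
  | cons _ rest ih =>
      intro l acc
      simp only [List.foldl_cons, ih, List.length_cons, List.range_succ_eq_map,
        List.map_cons, List.map_map]
      simp only [List.append_assoc, List.singleton_append]
      congr 1
      congr 1
      · simp
      · apply List.map_congr_left
        intro k _
        simp [List.drop_drop, Nat.succ_mul, Nat.add_comm]

lemma size_nonneg {l : List Int} {p : Int} (hp : 0 < p) :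
    0 ≤ -(PySem.Int.floordiv (-((l.length : Int))) p) := by
  have h := (PySem.Int.neg_floordiv_neg_eq_iff_of_pos
      (a := (l.length : Int)) (b := p)
      (q := -(PySem.Int.floordiv (-((l.length : Int))) p)) hp).mp rfl
  nlinarith [h.1, h.2, Int.natCast_nonneg l.length]

-- B's chunk list is A's chunk list
lemma chunks_eq (l : List Int) (p : Int) (hp : p ≠ 0) :
    (PySem.List.pyRange 0 p).map
        (fun i => PySem.List.slice l (some (i * (-(PySem.Int.floordiv (-((l.length : Int))) p))))
                                     (some ((i + 1) * (-(PySem.Int.floordiv (-((l.length : Int))) p)))))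
      = chunkListA l p := by
  rcases lt_or_gt_of_ne hp with hneg | hpos
  · have : PySem.List.pyRange 0 p = [] := PySem.List.pyRange_one_eq_nil (by omega)
    simp [chunkListA, this]
  · set s : Int := -(PySem.Int.floordiv (-((l.length : Int))) p) with hs
    have hs0 : 0 ≤ s := size_nonneg hpos
    set m : Nat := s.toNat with hm
    have hsm : s = (m : Int) := by omega
    have hto : ∀ xs : List Int, PySem.List.slice xs none (some s) = xs.take m :=
      fun xs => PySem.List.slice_to xs hs0
    have hfrom : ∀ xs : List Int, PySem.List.slice xs (some s) none = xs.drop m :=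
      fun xs => PySem.List.slice_from xs hs0
    unfold chunkListA
    rw [← hs]
    simp only [hto, hfrom]
    rw [peel_loop m (PySem.List.pyRange 0 p) l []]
    rw [PySem.List.pyRange_one 0 p, List.map_map]
    simp only [List.length_map, List.length_range]
    apply List.map_congr_left
    intro k _
    have h1 : (0 + (k : Int)) * s = ((k * m : Nat) : Int) := by push_cast [hsm]; ring
    have h2 : (0 + (k : Int) + 1) * s = (((k + 1) * m : Nat) : Int) := by push_cast [hsm]; ring
    rw [Function.comp_apply, h1, h2, PySem.List.slice_natCast]
    have hmm : (k + 1) * m = k * m + m := by ring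
    rw [hmm, Nat.add_sub_cancel_left]

-- A's outer loop appends one element to each component per iteration
lemma foldl_pair_append (F G : Int → List Int) : ∀ (idxs : List Int) (ts xs : List (List Int)),
    (idxs.foldl (fun (st : List (List Int) × List (List Int)) i =>
        (st.1 ++ [F i], st.2 ++ [G i])) (ts, xs))
      = (ts ++ idxs.map F, xs ++ idxs.map G) := by
  intro idxs
  induction idxs with
  | nil => intro ts xs; simp
  | cons a rest ih => intro ts xs; simp [ih]

-- range 0..n with index i removed, for 0 ≤ i < n
lemma filter_ne_pyRange {i n : Int} (h0 : 0 ≤ i) (hn : i < n) :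
    (PySem.List.pyRange 0 n).filter (fun u => u != i)
      = PySem.List.pyRange 0 i ++ PySem.List.pyRange (i + 1) n := by
  rw [PySem.List.pyRange_one_append 0 i n h0 (by omega),
      PySem.List.pyRange_one_append i (i + 1) n (by omega) (by omega),
      PySem.List.pyRange_one_singleton]
  have h1 : (PySem.List.pyRange 0 i).filter (fun u => u != i) = PySem.List.pyRange 0 i := by
    apply List.filter_eq_self.mpr
    intro u hu
    have := PySem.List.mem_pyRange_one.mp hu
    simp only [bne_iff_ne, ne_eq]
    omega
  have h2 : (PySem.List.pyRange (i + 1) n).filter (fun u => u != i)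
      = PySem.List.pyRange (i + 1) n := by
    apply List.filter_eq_self.mpr
    intro u hu
    have := PySem.List.mem_pyRange_one.mp hu
    simp only [bne_iff_ne, ne_eq]
    omega
  have h3 : ([i].filter (fun u => u != i)) = [] := by simp
  simp only [List.filter_append, h1, h2, h3]
  simp

-- A's training set for fold i, in take/drop form
lemma trainA_closed (cs : List (List Int)) {i : Int} (h0 : 0 ≤ i) (hn : i < (cs.length : Int)) :
    ((PySem.List.pyRange 0 (cs.length : Int)).filter (fun u => u != i)).flatMap
        (fun u => PySem.List.pyGetD cs u [])
      = (cs.take i.toNat).flatMap id ++ (cs.drop (i.toNat + 1)).flatMap id := by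
  rw [filter_ne_pyRange h0 hn, List.flatMap_append]
  have hdrop : (PySem.List.pyRange (i + 1) (cs.length : Int)).map
      (fun u => PySem.List.pyGetD cs u []) = cs.drop (i + 1).toNat :=
    PySem.List.map_pyGetD_pyRange' cs [] (by omega)
  have htake : (PySem.List.pyRange 0 i).map (fun u => PySem.List.pyGetD cs u [])
      = cs.take i.toNat := by
    have hsplit := PySem.List.pyRange_one_append 0 i (cs.length : Int) h0 (by omega)
    have hall := PySem.List.map_pyGetD_pyRange_zero' cs []
    rw [hsplit, List.map_append] at hall
    have hlen : ((PySem.List.pyRange 0 i).map (fun u => PySem.List.pyGetD cs u [])).length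
        = i.toNat := by
      simp [PySem.List.length_pyRange_one]
    calc (PySem.List.pyRange 0 i).map (fun u => PySem.List.pyGetD cs u [])
        = (((PySem.List.pyRange 0 i).map (fun u => PySem.List.pyGetD cs u [])) ++
            ((PySem.List.pyRange i (cs.length : Int)).map
              (fun u => PySem.List.pyGetD cs u []))).take i.toNat := by
          rw [← hlen, List.take_left]
      _ = cs.take i.toNat := by rw [hall]
  calc (PySem.List.pyRange 0 i).flatMap (fun u => PySem.List.pyGetD cs u []) ++
        (PySem.List.pyRange (i + 1) (cs.length : Int)).flatMap (fun u => PySem.List.pyGetD cs u [])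
      = ((PySem.List.pyRange 0 i).map (fun u => PySem.List.pyGetD cs u [])).flatMap id ++
        ((PySem.List.pyRange (i + 1) (cs.length : Int)).map
          (fun u => PySem.List.pyGetD cs u [])).flatMap id := by
        simp [List.flatMap_map]
    _ = _ := by
        rw [htake, hdrop]
        congr 3
        omega

-- A's whole computation on a fixed chunk list
lemma A_closed (cs : List (List Int)) :
    ((PySem.List.pyRange 0 (cs.length : Int)).foldl
      (fun (st : List (List Int) × List (List Int)) i =>
        (st.1 ++ [((PySem.List.pyRange 0 (cs.length : Int)).foldl
            (fun acc u => if u != i then acc ++ [PySem.List.pyGetD cs u []] else acc) []).foldl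
              (fun acc current => acc ++ current) []],
         st.2 ++ [PySem.List.pyGetD cs i []])) ([], []))
      = (trainOf [] cs, cs) := by
  rw [foldl_pair_append]
  simp only [Prod.mk.injEq, List.nil_append]
  refine ⟨?_, ?_⟩
  · have step1 : ∀ i ∈ PySem.List.pyRange 0 (cs.length : Int),
        ((PySem.List.pyRange 0 (cs.length : Int)).foldl
            (fun acc u => if u != i then acc ++ [PySem.List.pyGetD cs u []] else acc) []).foldl
              (fun acc current => acc ++ current) []
          = (cs.take i.toNat).flatMap id ++ (cs.drop (i.toNat + 1)).flatMap id := by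
      intro i hi
      obtain ⟨h0, hn⟩ := PySem.List.mem_pyRange_one.mp hi
      rw [PySem.List.foldl_append_if, PySem.List.foldl_append_eq_flatMap]
      simp only [List.nil_append, List.flatMap_map]
      exact trainA_closed cs h0 hn
    rw [List.map_congr_left step1, trainOf_eq_map,
        PySem.List.pyRange_zero_nat cs.length, List.map_map]
    apply List.map_congr_left
    intro k hk
    simp
  · simpa using PySem.List.map_pyGetD_pyRange_zero' cs []

-- B's loop on a fixed chunk list; full is the flatten of all chunks
lemma B_loop (full : List Int) : ∀ (cs pre ts xs : List (List Int)),
    full = (pre ++ cs).flatMap id →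
    (cs.foldl (fun (st : List (List Int) × List (List Int) × Int) c =>
        (st.1 ++ [PySem.List.slice full none (some st.2.2) ++
                  PySem.List.slice full (some (st.2.2 + (c.length : Int))) none],
         st.2.1 ++ [c],
         st.2.2 + (c.length : Int)))
      (ts, xs, ((pre.flatMap id).length : Int)))
    = (ts ++ trainOf pre cs, xs ++ cs, (((pre ++ cs).flatMap id).length : Int)) := by
  intro cs
  induction cs with
  | nil => intro pre ts xs _; simp [trainOf]
  | cons c rest ih =>
      intro pre ts xs hfull
      simp only [List.foldl_cons]
      have hoff : ((pre.flatMap id).length : Int) + (c.length : Int)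
          = ((((pre ++ [c]).flatMap id)).length : Int) := by
        simp
      have htake : PySem.List.slice full none (some ((pre.flatMap id).length : Int))
          = pre.flatMap id := by
        rw [PySem.List.slice_to full (by omega)]
        rw [hfull]
        simp only [List.flatMap_append, Int.toNat_natCast, List.take_left]
      have hdrop : PySem.List.slice full
            (some (((pre.flatMap id).length : Int) + (c.length : Int))) none
          = rest.flatMap id := by
        rw [PySem.List.slice_from full (by omega)]
        have h1 : ((((pre.flatMap id).length : Int)) + ((c.length : Int))).toNat
            = ((pre.flatMap id) ++ c).length := by
          rw [List.length_append]; omega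
        have h2 : full = ((pre.flatMap id) ++ c) ++ rest.flatMap id := by
          rw [hfull]; simp
        rw [h1, h2, List.drop_left]
      have hfull' : full = ((pre ++ [c]) ++ rest).flatMap id := by
        rw [hfull]; simp
      rw [htake, hdrop, hoff, ih (pre ++ [c]) (ts ++ [pre.flatMap id ++ rest.flatMap id]) (xs ++ [c]) hfull']
      simp [trainOf]

-- ===== VERDICT (by name: the statement is the Claim_ definition above) =====
theorem crossValidationChunk_spec : Claim_equal_crossValidationChunk := by
  intro l p _ hp
  unfold Spec_crossValidationChunk
  unfold crossValidationChunk crossValidationChunk_alt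
  simp only []
  rw [chunks_eq l p hp]
  have hB := B_loop ((chunkListA l p).flatMap id) (chunkListA l p) [] [] []
    (by simp)
  simp only [List.nil_append, List.flatMap_nil, List.length_nil, Int.natCast_zero] at hB
  rw [hB, A_closed (chunkListA l p)]
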